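-- pv_equiv track=rewrite | github.com/woasidh/algorithm | python/programmers/level3/43238.py | solution
-- ===== SOURCE A (Python) =====
-- def solution(n, counters):
--     answer = 0
--     maxTime = n * max(counters);
--     minTime = 0;
--     # 0 1 1 2 2 3 3
--     while minTime <= maxTime:
--         mid = (minTime + maxTime) // 2;
--         if getFinished(counters, mid) >= n:
--             maxTime = mid - 1;
--         else:
--             minTime = mid + 1;
--     return minTime;
--
-- def getFinished(counters, time):
--     finished = 0;
--     for counter in counters:
--         finished += time // counter;
--     return finished;
-- ===== SOURCE B (Python) =====
-- def solution(n, counters):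
--     # The answer is the n-th smallest element of the union of the counters'
--     # arithmetic progressions c, 2c, 3c, ...  Estimate it in closed form with the
--     # harmonic rate H = sum(1/c) = p/q (count(t) lies in (t*H - len, t*H]), giving a
--     # base time lo with count(lo) < n; then merge the few remaining finish events,
--     # always advancing the counter whose next finishing time is smallest.
--     if n <= 0:
--         return 0
--     q = 1
--     for c in counters:
--         q *= c
--     p = sum(q // c for c in counters)
--     lo = (n * q - 1) // p          # largest time with lo*H < n, so count(lo) < n
--     nxt = [c * (lo // c + 1) for c in counters]   # next finishing time of each counter
--     r = n - sum(lo // c for c in counters)        # events still to merge (<= len + H)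
--     t = lo
--     for _ in range(r):
--         t = min(nxt)
--         i = nxt.index(t)
--         nxt[i] = t + counters[i]
--     return t
-- ===== Notes on version B (the rewrite author's own statement) =====
-- stated objective: alternative
-- what changed: Replaces the binary search over time by a closed-form harmonic estimate (largest lo with lo*sum(1/c) < n, exact integer arithmetic) followed by an n-way merge of the counters' remaining finish events; the answer is the n-th smallest multiple of the counters.
-- outside the precondition, e.g. on solution(1, [2, -2]): A returns 3, B raises ZeroDivisionError; on solution(2, [-3]): A returns 0, B returns -7; on solution(0, [0]): A raises ZeroDivisionError, B returns 0
import Mathlib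
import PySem

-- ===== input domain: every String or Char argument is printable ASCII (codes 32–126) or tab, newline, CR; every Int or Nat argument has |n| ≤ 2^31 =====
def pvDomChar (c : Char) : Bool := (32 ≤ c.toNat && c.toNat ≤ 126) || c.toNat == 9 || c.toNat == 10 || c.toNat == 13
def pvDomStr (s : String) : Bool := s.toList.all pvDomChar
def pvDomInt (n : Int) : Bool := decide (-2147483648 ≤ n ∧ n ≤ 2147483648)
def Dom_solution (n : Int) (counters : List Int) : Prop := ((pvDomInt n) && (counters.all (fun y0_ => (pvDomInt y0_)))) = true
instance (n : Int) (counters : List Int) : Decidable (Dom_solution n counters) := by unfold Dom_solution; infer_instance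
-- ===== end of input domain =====

-- B replaces A's binary search by a closed-form harmonic estimate of the answer
-- followed by an n-way merge of the counters' remaining finish events (the answer is
-- the n-th smallest multiple of the counters); a different algorithm (objective: alternative).


-- ===== PORT A =====
def getFinished (counters : List Int) (time : Int) : Int :=
  counters.foldl (fun finished counter => finished + PySem.Int.floordiv time counter) 0

def solutionLoop (n : Int) (counters : List Int) (minTime maxTime : Int) : Int :=
  if h : minTime ≤ maxTime then
    let mid := PySem.Int.floordiv (minTime + maxTime) 2
    if getFinished counters mid ≥ n then
      solutionLoop n counters minTime (mid - 1)
    else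
      solutionLoop n counters (mid + 1) maxTime
  else minTime
termination_by (maxTime + 1 - minTime).toNat
decreasing_by
  · have := PySem.Int.floordiv_two_mid_bounds h; omega
  · have := PySem.Int.floordiv_two_mid_bounds h; omega

def solution (n : Int) (counters : List Int) : Int :=
  -- max(counters): ValueError on [] is excluded by Pre_solution
  let maxTime := n * ((PySem.List.max? counters (fun x => x)).getD 0)
  solutionLoop n counters 0 maxTime

-- ===== PORT B =====
-- one loop body: t = min(nxt); i = nxt.index(t); nxt[i] = t + counters[i]
-- (the .getD 0 / none fallbacks only totalise unreachable code: min([]) raises and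
-- is excluded by Pre_solution, and nxt.index(min(nxt)) always succeeds)
def mergeStep (counters nxt : List Int) : Int × List Int :=
  let t := (PySem.List.min? nxt (fun x => x)).getD 0
  match PySem.List.index? nxt t with
  | some i => (t, nxt.set i (t + (PySem.List.pyGet? counters (i : Int)).getD 0))
  | none => (t, nxt)

-- for _ in range(n): …
def mergeLoop (counters nxt : List Int) (t : Int) : Nat → Int
  | 0 => t
  | Nat.succ m =>
      let p := mergeStep counters nxt
      mergeLoop counters p.2 p.1 m

def solution_alt (n : Int) (counters : List Int) : Int :=
  if n ≤ 0 then 0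
  else
    -- q = 1; for c in counters: q *= c  — and 'sum(q // c …)' raises ZeroDivisionError
    -- on a zero counter (excluded by Pre_solution, where A raises too)
    let q := counters.foldl (fun a c => a * c) 1
    let p := (counters.map (fun c => PySem.Int.floordiv q c)).sum
    let lo := PySem.Int.floordiv (n * q - 1) p
    let nxt := counters.map (fun c => c * (PySem.Int.floordiv lo c + 1))
    let r := n - (counters.map (fun c => PySem.Int.floordiv lo c)).sum
    mergeLoop counters nxt lo r.toNat

-- ===== PRECONDITION & SPEC =====
-- Pre_ restricts to the task's natural domain: it excludes empty counters (A raises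
-- ValueError at max(counters)), a zero counter reached by the search (ZeroDivisionError),
-- and, for a positive request n, counters with a nonpositive entry — there the finished-count
-- is not monotone in time, so the value A's binary search happens to return is an accident of
-- its implementation; degenerate requests n ≤ 0 stay admitted whenever A returns on them.
def Pre_solution (n : Int) (counters : List Int) : Prop :=
  counters ≠ [] ∧
    ((0 < n ∧ ∀ c ∈ counters, 1 ≤ c) ∨
     (n < 0 ∧ ∃ c ∈ counters, 0 < c) ∨
     (n = 0 ∧ (0:Int) ∉ counters))
instance (n : Int) (counters : List Int) : Decidable (Pre_solution n counters) := by
  unfold Pre_solution; infer_instance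

def pvWitness_solution : Int × List Int := (3, [2, 1])

def Spec_solution (n : Int) (counters : List Int) (out : Int) : Prop := out = solution_alt n counters
instance (n : Int) (counters : List Int) (out : Int) : Decidable (Spec_solution n counters out) := by unfold Spec_solution; infer_instance

-- ===== CLAIM (what is proved, stated in full; the proofs are below) =====
def Claim_equal_solution : Prop := ∀ (n : Int) (counters : List Int), Dom_solution n counters → Pre_solution n counters → Spec_solution n counters (solution n counters)

-- ===== LEMMAS AND PROOFS =====

-- "r is the least time with at least m passengers finished"
def LeastP (counters : List Int) (m r : Int) : Prop :=
  (∀ u, u < r → getFinished counters u < m) ∧ m ≤ getFinished counters r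

theorem gf_eq (counters : List Int) (t : Int) :
    getFinished counters t = (counters.map (fun c => PySem.Int.floordiv t c)).sum := by
  unfold getFinished
  rw [PySem.List.foldl_add counters (fun c => PySem.Int.floordiv t c) 0]
  simp

theorem gf_mono (counters : List Int) (hc : ∀ c ∈ counters, 1 ≤ c) {s t : Int} (h : s ≤ t) :
    getFinished counters s ≤ getFinished counters t := by
  rw [gf_eq, gf_eq]
  apply List.sum_le_sum
  intro c hcm
  have h1 : (0:Int) < c := by have := hc c hcm; omega
  rw [PySem.Int.floordiv_eq_ediv_of_pos h1, PySem.Int.floordiv_eq_ediv_of_pos h1]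
  exact Int.ediv_le_ediv h1 h

theorem gf_zero (counters : List Int) : getFinished counters 0 = 0 := by
  rw [gf_eq]
  have e : counters.map (fun c => PySem.Int.floordiv 0 c) = counters.map (fun _ => (0:Int)) := by
    apply List.map_congr_left
    intro c _
    simp [PySem.Int.floordiv]
  rw [e]
  simp

theorem gf_neg (counters : List Int) (hne : counters ≠ []) (hc : ∀ c ∈ counters, 1 ≤ c)
    {t : Int} (ht : t < 0) : getFinished counters t ≤ -1 := by
  have hterm : ∀ c ∈ counters, PySem.Int.floordiv t c ≤ -1 := by
    intro c hcm
    have h1 : (0:Int) < c := by have := hc c hcm; omega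
    have := (PySem.Int.floordiv_lt_iff_lt_mul (a := t) (q := 0) h1).mpr (by omega)
    omega
  rw [gf_eq]
  cases counters with
  | nil => exact absurd rfl hne
  | cons c cs =>
    have hcs : (cs.map (fun c => PySem.Int.floordiv t c)).sum ≤ 0 := by
      have : (cs.map (fun c => PySem.Int.floordiv t c)).sum ≤ (cs.map (fun _ => (0:Int))).sum := by
        apply List.sum_le_sum
        intro x hx
        have := hterm x (List.mem_cons_of_mem c hx)
        omega
      simpa using this
    have hc0 := hterm c (List.mem_cons_self)
    simp only [List.map_cons, List.sum_cons]
    omega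

theorem gf_lower (counters : List Int) (hc : ∀ c ∈ counters, 1 ≤ c) {m t : Int}
    (hm : m ∈ counters) (ht : 0 ≤ t) :
    PySem.Int.floordiv t m ≤ getFinished counters t := by
  rw [gf_eq]
  apply List.single_le_sum
  · intro x hx
    obtain ⟨c, hcm, rfl⟩ := List.mem_map.mp hx
    have h1 : (0:Int) < c := by have := hc c hcm; omega
    exact (PySem.Int.le_floordiv_iff_mul_le h1).mpr (by omega)
  · exact List.mem_map_of_mem hm

theorem least_unique (counters : List Int) (m r r' : Int)
    (h1 : LeastP counters m r) (h2 : LeastP counters m r') : r = r' := by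
  obtain ⟨ha, hb⟩ := h1
  obtain ⟨hc', hd⟩ := h2
  rcases lt_trichotomy r r' with h | h | h
  · have := hc' r h; omega
  · exact h
  · have := ha r' h; omega

theorem loopA_correct (n : Int) (counters : List Int) (hc : ∀ c ∈ counters, 1 ≤ c)
    (lo hi : Int) (hlow : ∀ t, t < lo → getFinished counters t < n)
    (hhigh : ∀ t, hi < t → n ≤ getFinished counters t) :
    LeastP counters n (solutionLoop n counters lo hi) := by
  have main : ∀ (N : Nat) (lo hi : Int), (hi + 1 - lo).toNat = N →
      (∀ t, t < lo → getFinished counters t < n) →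
      (∀ t, hi < t → n ≤ getFinished counters t) →
      LeastP counters n (solutionLoop n counters lo hi) := by
    intro N
    induction N using Nat.strong_induction_on with
    | _ N ih =>
      intro lo hi hN hlow hhigh
      rw [solutionLoop]
      by_cases hle : lo ≤ hi
      · rw [dif_pos hle]
        have hb := PySem.Int.floordiv_two_mid_bounds hle
        dsimp only
        split
        · rename_i hge
          apply ih ((PySem.Int.floordiv (lo + hi) 2 - 1) + 1 - lo).toNat (by omega) lo _ rfl hlow
          intro t ht
          exact le_trans hge (gf_mono counters hc (by omega))
        · rename_i hge
          apply ih (hi + 1 - (PySem.Int.floordiv (lo + hi) 2 + 1)).toNat (by omega) _ hi rfl _ hhigh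
          intro t ht
          have := gf_mono counters hc (s := t) (t := PySem.Int.floordiv (lo + hi) 2) (by omega)
          omega
      · rw [dif_neg hle]
        exact ⟨fun u hu => hlow u hu, hhigh lo (by omega)⟩
  exact main (hi + 1 - lo).toNat lo hi rfl hlow hhigh

theorem solution_least (n : Int) (counters : List Int) (hne : counters ≠ [])
    (hc : ∀ c ∈ counters, 1 ≤ c) (hn : 0 ≤ n) :
    LeastP counters n (solution n counters) := by
  cases hmax : PySem.List.max? counters (fun x => x) with
  | none => exact absurd ((PySem.List.max?_eq_none_iff counters (fun x => x)).mp hmax) hne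
  | some m =>
    have hmem : m ∈ counters := PySem.List.max?_mem hmax
    have hm1 : 1 ≤ m := hc m hmem
    simp only [solution, hmax, Option.getD_some]
    apply loopA_correct n counters hc
    · intro t ht
      have := gf_neg counters hne hc (t := t) (by omega)
      omega
    · intro t ht
      have hnm : 0 ≤ n * m := mul_nonneg hn (by omega)
      have ht0 : (0:Int) ≤ t := by omega
      have h1 := gf_lower counters hc hmem ht0
      have h2 : n ≤ PySem.Int.floordiv t m :=
        (PySem.Int.le_floordiv_iff_mul_le (by omega)).mpr (by omega)
      omega

-- ---------- B side ----------

-- loop invariant of the merge: nxt holds, per position, the next unfinished multiple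
-- c*(k+1) of its counter c; t (the last event) is at least every finished multiple c*k
-- and at most every pending one; m (= events so far) equals the sum of the k's.
def MInv (counters nxt : List Int) (t m : Int) : Prop :=
  nxt.length = counters.length ∧
  (∀ p ∈ List.zip counters nxt, p.1 ∣ p.2 ∧ p.1 ≤ p.2 ∧ p.2 - p.1 ≤ t ∧ t ≤ p.2) ∧
  (List.zipWith (fun c v => v / c - 1) counters nxt).sum = m

theorem zipWith_sum_le (f f' : Int → Int → Int) :
    ∀ (l1 l2 : List Int), (∀ p ∈ List.zip l1 l2, f p.1 p.2 ≤ f' p.1 p.2) →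
      (List.zipWith f l1 l2).sum ≤ (List.zipWith f' l1 l2).sum := by
  intro l1
  induction l1 with
  | nil => intro l2 _; simp
  | cons c cs ih =>
    intro l2 h
    cases l2 with
    | nil => simp
    | cons v vs =>
      simp only [List.zipWith_cons_cons, List.sum_cons]
      have h1 : f c v ≤ f' c v := h (c, v) (by simp [List.zip_cons_cons])
      have h2 := ih vs (fun p hp => h p (by simp [List.zip_cons_cons, hp]))
      omega

theorem map_sum_eq_zipWith (g : Int → Int) :
    ∀ (l1 l2 : List Int), l1.length = l2.length →
      (l1.map g).sum = (List.zipWith (fun c _ => g c) l1 l2).sum := by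
  intro l1
  induction l1 with
  | nil => intro l2 _; simp
  | cons c cs ih =>
    intro l2 h
    cases l2 with
    | nil => simp at h
    | cons v vs =>
      simp only [List.map_cons, List.zipWith_cons_cons, List.sum_cons]
      rw [ih vs (by simpa using h)]

theorem inv_lower (counters nxt : List Int) (t m : Int)
    (hc : ∀ c ∈ counters, 1 ≤ c) (hinv : MInv counters nxt t m) :
    m ≤ getFinished counters t := by
  obtain ⟨hlen, hmem, hsum⟩ := hinv
  rw [gf_eq, map_sum_eq_zipWith _ counters nxt hlen.symm, ← hsum]
  apply zipWith_sum_le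
  intro p hp
  obtain ⟨hdvd, hle, hfin, _⟩ := hmem p hp
  have hc1 : 1 ≤ p.1 := hc p.1 (List.of_mem_zip hp).1
  have hmul : p.2 / p.1 * p.1 = p.2 := Int.ediv_mul_cancel hdvd
  refine (PySem.Int.le_floordiv_iff_mul_le (by omega)).mpr ?_
  have : (p.2 / p.1 - 1) * p.1 = p.2 - p.1 := by rw [sub_mul, hmul]; ring
  omega

theorem inv_upper (counters nxt : List Int) (t m u : Int)
    (hc : ∀ c ∈ counters, 1 ≤ c) (hinv : MInv counters nxt t m)
    (hu : ∀ v ∈ nxt, u < v) :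
    getFinished counters u ≤ m := by
  obtain ⟨hlen, hmem, hsum⟩ := hinv
  rw [gf_eq, map_sum_eq_zipWith _ counters nxt hlen.symm, ← hsum]
  apply zipWith_sum_le
  intro p hp
  obtain ⟨hdvd, hle, _, _⟩ := hmem p hp
  have hc1 : 1 ≤ p.1 := hc p.1 (List.of_mem_zip hp).1
  have huv : u < p.2 := hu p.2 (List.of_mem_zip hp).2
  have hmul : p.2 / p.1 * p.1 = p.2 := Int.ediv_mul_cancel hdvd
  have : PySem.Int.floordiv u p.1 < p.2 / p.1 :=
    (PySem.Int.floordiv_lt_iff_lt_mul (by omega)).mpr (by omega)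
  omega

theorem mergeStep_decomp (counters nxt : List Int) (hne : nxt ≠ [])
    (hlen : nxt.length = counters.length) :
    ∃ (t' c : Int) (p s cp cs : List Int),
      mergeStep counters nxt = (t', p ++ (t' + c) :: s) ∧
      nxt = p ++ t' :: s ∧ counters = cp ++ c :: cs ∧ cp.length = p.length ∧
      (∀ y ∈ nxt, t' ≤ y) := by
  cases hmin : PySem.List.min? nxt (fun x => x) with
  | none => exact absurd ((PySem.List.min?_eq_none_iff nxt (fun x => x)).mp hmin) hne
  | some t' =>
    have hmem : t' ∈ nxt := PySem.List.min?_mem hmin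
    have hidx : (PySem.List.index? nxt t').isSome :=
      (PySem.List.index?_isSome_iff nxt t').mpr hmem
    cases hix : PySem.List.index? nxt t' with
    | none => rw [hix] at hidx; simp at hidx
    | some i =>
      obtain ⟨pre, suf, hdec, hpl, _⟩ := (PySem.List.index?_eq_some_iff nxt t' i).mp hix
      have hil : i < nxt.length := by rw [hdec]; simp; omega
      have hic : i < counters.length := by omega
      have hget : (PySem.List.pyGet? counters (i : Int)).getD 0 = counters[i] := by
        rw [PySem.List.pyGet?_natCast, List.getElem?_eq_getElem hic]; rfl
      refine ⟨t', counters[i], pre, suf, counters.take i, counters.drop (i + 1), ?_, hdec, ?_, ?_, ?_⟩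
      · unfold mergeStep
        rw [hmin]
        simp only [Option.getD_some]
        rw [hix]
        dsimp only
        rw [hget, hdec]
        have : (pre ++ t' :: suf).set i (t' + counters[i]) = pre ++ (t' + counters[i]) :: suf := by
          rw [List.set_append]
          rw [if_neg (by omega)]
          have : i - pre.length = 0 := by omega
          rw [this]
          rfl
        rw [this]
      · conv_lhs => rw [← List.take_append_drop i counters]
        rw [List.drop_eq_getElem_cons hic]
      · simp [List.length_take]; omega
      · intro y hy
        exact PySem.List.min?_isMin hmin y hy

theorem inv_step (counters nxt : List Int) (t m : Int)
    (hc : ∀ c ∈ counters, 1 ≤ c) (hne : nxt ≠ []) (hinv : MInv counters nxt t m) :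
    MInv counters (mergeStep counters nxt).2 (mergeStep counters nxt).1 (m + 1) ∧
    t ≤ (mergeStep counters nxt).1 ∧
    (∀ v ∈ nxt, (mergeStep counters nxt).1 ≤ v) := by
  obtain ⟨hlen, hmem, hsum⟩ := hinv
  obtain ⟨t', c, p, s, cp, cs, heq, hnxt, hcnt, hl, hminle⟩ :=
    mergeStep_decomp counters nxt hne hlen
  have hzip : List.zip counters nxt = List.zip cp p ++ (c, t') :: List.zip cs s := by
    rw [hcnt, hnxt, List.zip_append hl, List.zip_cons_cons]
  have hmemold : (c, t') ∈ List.zip counters nxt := by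
    rw [hzip]; exact List.mem_append_right _ List.mem_cons_self
  obtain ⟨hdvd, hcle, hfin, htle⟩ := hmem (c, t') hmemold
  dsimp only at hdvd hcle hfin htle
  have hc1 : 1 ≤ c := hc c (List.of_mem_zip hmemold).1
  rw [heq]
  dsimp only
  have hzip' : List.zip counters (p ++ (t' + c) :: s) =
      List.zip cp p ++ (c, t' + c) :: List.zip cs s := by
    rw [hcnt, List.zip_append hl, List.zip_cons_cons]
  refine ⟨⟨?_, ?_, ?_⟩, htle, hminle⟩
  · have h1 := congrArg List.length hnxt
    have h2 := congrArg List.length hcnt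
    simp at h1 h2 ⊢
    omega
  · intro q hq
    rw [hzip'] at hq
    rcases List.mem_append.mp hq with h | h
    · have hold : q ∈ List.zip counters nxt := by
        rw [hzip]; exact List.mem_append_left _ h
      obtain ⟨h1, h2, h3, _⟩ := hmem q hold
      have hq2 : q.2 ∈ nxt := (List.of_mem_zip hold).2
      exact ⟨h1, h2, by have := hminle q.2 hq2; omega, hminle q.2 hq2⟩
    · rcases List.mem_cons.mp h with h | h
      · subst h
        refine ⟨dvd_add hdvd dvd_rfl, by omega, by omega, by omega⟩
      · have hold : q ∈ List.zip counters nxt := by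
          rw [hzip]; exact List.mem_append_right _ (List.mem_cons_of_mem _ h)
        obtain ⟨h1, h2, h3, _⟩ := hmem q hold
        have hq2 : q.2 ∈ nxt := (List.of_mem_zip hold).2
        exact ⟨h1, h2, by have := hminle q.2 hq2; omega, hminle q.2 hq2⟩
  · have hdivstep : (t' + c) / c = t' / c + 1 := by
      have := Int.add_mul_ediv_right t' 1 (by omega : c ≠ 0)
      simpa using this
    have holdsum := hsum
    rw [hcnt, hnxt, List.zipWith_append hl, List.zipWith_cons_cons,
      List.sum_append, List.sum_cons] at holdsum
    rw [hcnt, List.zipWith_append hl, List.zipWith_cons_cons,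
      List.sum_append, List.sum_cons, hdivstep]
    omega

theorem merge_correct (counters : List Int) (hc : ∀ c ∈ counters, 1 ≤ c)
    (hcne : counters ≠ []) :
    ∀ (fuel : Nat) (nxt : List Int) (t m : Int), MInv counters nxt t m →
      LeastP counters (m + (fuel + 1 : Nat)) (mergeLoop counters nxt t (fuel + 1)) := by
  intro fuel
  induction fuel with
  | zero =>
    intro nxt t m hinv
    have hne : nxt ≠ [] := by
      intro h
      have := hinv.1
      rw [h] at this
      exact hcne (List.eq_nil_of_length_eq_zero (by simpa using this.symm))
    obtain ⟨hinv', _, hminle⟩ := inv_step counters nxt t m hc hne hinv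
    simp only [mergeLoop]
    constructor
    · intro u hu
      have : getFinished counters u ≤ m :=
        inv_upper counters nxt t m u hc hinv (fun v hv => lt_of_lt_of_le hu (hminle v hv))
      push_cast
      omega
    · have := inv_lower counters _ _ _ hc hinv'
      push_cast
      omega
  | succ fuel ih =>
    intro nxt t m hinv
    have hne : nxt ≠ [] := by
      intro h
      have := hinv.1
      rw [h] at this
      exact hcne (List.eq_nil_of_length_eq_zero (by simpa using this.symm))
    obtain ⟨hinv', _, _⟩ := inv_step counters nxt t m hc hne hinv
    have step := ih _ _ _ hinv'
    have he : m + 1 + ((fuel + 1 : Nat) : Int) = m + ((fuel + 1 + 1 : Nat) : Int) := by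
      push_cast; omega
    rw [he] at step
    simpa only [mergeLoop] using step

theorem dvd_foldl_mul (x : Int) : ∀ (l : List Int) (a : Int), x ∣ a →
    x ∣ l.foldl (fun a c => a * c) a := by
  intro l
  induction l with
  | nil => intro a h; simpa using h
  | cons c cs ih => intro a h; exact ih (a * c) (Dvd.dvd.mul_right h c)

theorem mem_dvd_foldl_mul : ∀ (l : List Int) (a c : Int), c ∈ l →
    c ∣ l.foldl (fun a c => a * c) a := by
  intro l
  induction l with
  | nil => intro a c h; simp at h
  | cons c' cs ih =>
    intro a c h
    rcases List.mem_cons.mp h with h | h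
    · subst h
      exact dvd_foldl_mul c cs (a * c) (Dvd.intro_left a rfl)
    · exact ih (a * c') c h

theorem one_le_foldl_mul : ∀ (l : List Int), (∀ c ∈ l, 1 ≤ c) → ∀ a : Int, 1 ≤ a →
    1 ≤ l.foldl (fun a c => a * c) a := by
  intro l
  induction l with
  | nil => intro _ a ha; simpa using ha
  | cons c cs ih =>
    intro h a ha
    have hc1 : 1 ≤ c := h c List.mem_cons_self
    exact ih (fun x hx => h x (List.mem_cons_of_mem c hx)) (a * c) (by nlinarith)

theorem one_le_sum_of_ne_nil : ∀ (l : List Int), l ≠ [] → (∀ x ∈ l, 1 ≤ x) → 1 ≤ l.sum := by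
  intro l
  cases l with
  | nil => intro h; exact absurd rfl h
  | cons x xs =>
    intro _ h
    have hx := h x List.mem_cons_self
    have hxs : 0 ≤ xs.sum :=
      List.sum_nonneg (fun y hy => by have := h y (List.mem_cons_of_mem x hy); omega)
    simp only [List.sum_cons]
    omega

theorem zip_map_mem (l : List Int) (f : Int → Int) :
    ∀ p ∈ List.zip l (l.map f), p.1 ∈ l ∧ p.2 = f p.1 := by
  induction l with
  | nil => simp
  | cons c cs ih =>
    intro p hp
    rw [List.map_cons, List.zip_cons_cons] at hp
    rcases List.mem_cons.mp hp with h | h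
    · subst h; exact ⟨List.mem_cons_self, rfl⟩
    · obtain ⟨h1, h2⟩ := ih p h
      exact ⟨List.mem_cons_of_mem c h1, h2⟩

-- count(t)·q ≤ t·p : each counter c contributes (t//c)·q = (t//c)·c·(q/c) ≤ t·(q/c)
theorem gf_mul_le (counters : List Int) (q t : Int) (hq : 1 ≤ q)
    (hc : ∀ c ∈ counters, 1 ≤ c) (hdvd : ∀ c ∈ counters, c ∣ q) :
    q * getFinished counters t ≤ t * (counters.map (fun c => PySem.Int.floordiv q c)).sum := by
  rw [gf_eq, ← List.sum_map_mul_left, ← List.sum_map_mul_left]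
  apply List.sum_le_sum
  intro c hcm
  have hc1 : 1 ≤ c := hc c hcm
  have hd := hdvd c hcm
  rw [PySem.Int.floordiv_eq_ediv_of_pos (by omega : (0:Int) < c),
      PySem.Int.floordiv_eq_ediv_of_pos (by omega : (0:Int) < c)]
  have hcd : c * (q / c) = q := Int.mul_ediv_cancel' hd
  have hd0 : 0 ≤ q / c := Int.ediv_nonneg (by omega) (by omega)
  have h1 : t / c * c ≤ t := Int.ediv_mul_le t (by omega)
  have h2 := mul_le_mul_of_nonneg_right h1 hd0
  calc q * (t / c) = t / c * c * (q / c) := by rw [mul_assoc, hcd]; ring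
    _ ≤ t * (q / c) := h2

theorem zipWith_self_eq_map (g : Int → Int → Int) :
    ∀ l : List Int, List.zipWith g l l = l.map (fun a => g a a) := by
  intro l
  induction l with
  | nil => rfl
  | cons c cs ih => simp

theorem alt_least (n : Int) (counters : List Int) (hne : counters ≠ [])
    (hc : ∀ c ∈ counters, 1 ≤ c) (hn : 1 ≤ n) :
    LeastP counters n (solution_alt n counters) := by
  unfold solution_alt
  rw [if_neg (by omega)]
  set q := counters.foldl (fun a c => a * c) 1 with hqdef
  set p := (counters.map (fun c => PySem.Int.floordiv q c)).sum with hpdef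
  have hq1 : 1 ≤ q := one_le_foldl_mul counters hc 1 le_rfl
  have hdvd : ∀ c ∈ counters, c ∣ q := fun c hcm => mem_dvd_foldl_mul counters 1 c hcm
  have hp1 : 1 ≤ p := by
    apply one_le_sum_of_ne_nil
    · simpa using hne
    · intro x hx
      obtain ⟨c, hcm, rfl⟩ := List.mem_map.mp hx
      have hc1 : 1 ≤ c := hc c hcm
      rw [PySem.Int.floordiv_eq_ediv_of_pos (by omega : (0:Int) < c)]
      have hcd : c * (q / c) = q := Int.mul_ediv_cancel' (hdvd c hcm)
      have hd0 : 0 ≤ q / c := Int.ediv_nonneg (by omega) (by omega)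
      nlinarith [hcd]
  set lo := PySem.Int.floordiv (n * q - 1) p with hlodef
  have hnq : 1 ≤ n * q := by nlinarith
  have hlo0 : 0 ≤ lo := by
    rw [hlodef]
    exact (PySem.Int.le_floordiv_iff_mul_le (by omega : (0:Int) < p)).mpr (by omega)
  have hlole : lo * p ≤ n * q - 1 := by
    exact (PySem.Int.le_floordiv_iff_mul_le (a := n * q - 1) (q := lo)
      (by omega : (0:Int) < p)).mp (le_of_eq hlodef)
  set m0 := (counters.map (fun c => PySem.Int.floordiv lo c)).sum with hm0def
  have hm0 : m0 = getFinished counters lo := by rw [hm0def, gf_eq]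
  have hm0lt : m0 < n := by
    have h1 : q * m0 ≤ lo * p := by
      rw [hm0, hpdef]; exact gf_mul_le counters q lo hq1 hc hdvd
    nlinarith
  set nxt := counters.map (fun c => c * (PySem.Int.floordiv lo c + 1)) with hnxtdef
  have hinv : MInv counters nxt lo m0 := by
    refine ⟨by simp [hnxtdef], ?_, ?_⟩
    · intro pr hpr
      obtain ⟨hmem, heq2⟩ := zip_map_mem counters _ pr (by rwa [hnxtdef] at hpr)
      have hc1 : 1 ≤ pr.1 := hc pr.1 hmem
      rw [PySem.Int.floordiv_eq_ediv_of_pos (by omega : (0:Int) < pr.1)] at heq2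
      have hk0 : 0 ≤ lo / pr.1 := Int.ediv_nonneg hlo0 (by omega)
      have hmul : lo / pr.1 * pr.1 ≤ lo := Int.ediv_mul_le lo (by omega)
      have hup : lo < (lo / pr.1 + 1) * pr.1 := Int.lt_ediv_add_one_mul_self lo (by omega)
      refine ⟨⟨lo / pr.1 + 1, heq2⟩, by nlinarith, by nlinarith, by nlinarith⟩
    · rw [hnxtdef, List.zipWith_map_right, zipWith_self_eq_map, hm0def]
      apply congrArg
      apply List.map_congr_left
      intro c hcm
      have hc1 : 1 ≤ c := hc c hcm
      rw [Int.mul_ediv_cancel_left _ (by omega : c ≠ 0),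
        PySem.Int.floordiv_eq_ediv_of_pos (by omega : (0:Int) < c)]
      omega
  show LeastP counters n (mergeLoop counters nxt lo (n - m0).toNat)
  obtain ⟨fuel, hfuel⟩ : ∃ fuel : Nat, (n - m0).toNat = fuel + 1 :=
    ⟨(n - m0).toNat - 1, by omega⟩
  rw [hfuel]
  have := merge_correct counters hc hne fuel nxt lo m0 hinv
  have he : m0 + ((fuel + 1 : Nat) : Int) = n := by
    have h2 : ((fuel + 1 : Nat) : Int) = ((n - m0).toNat : Int) := by rw [hfuel]
    omega
  rwa [he] at this

-- ===== VERDICT (by name: the statement is the Claim_ definition above) =====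
theorem solution_spec : Claim_equal_solution := by
  intro n counters _ hpre
  obtain ⟨hne, hcase⟩ := hpre
  unfold Spec_solution
  rcases hcase with ⟨hn, hc⟩ | ⟨hn, c0, hc0m, hc0⟩ | ⟨hn, h0⟩
  · exact least_unique counters n (solution n counters) (solution_alt n counters)
      (solution_least n counters hne hc (by omega))
      (alt_least n counters hne hc (by omega))
  · cases hmax : PySem.List.max? counters (fun x => x) with
    | none => exact absurd ((PySem.List.max?_eq_none_iff counters (fun x => x)).mp hmax) hne
    | some m =>
      have hm1 : (1:Int) ≤ m := le_trans (by omega) (PySem.List.max?_isMax hmax c0 hc0m)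
      have hA : solution n counters = 0 := by
        simp only [solution, hmax, Option.getD_some]
        rw [solutionLoop, dif_neg (by nlinarith)]
      have hB : solution_alt n counters = 0 := by
        simp only [solution_alt]
        rw [if_pos (by omega)]
      rw [hA, hB]
  · subst hn
    cases hmax : PySem.List.max? counters (fun x => x) with
    | none => exact absurd ((PySem.List.max?_eq_none_iff counters (fun x => x)).mp hmax) hne
    | some m =>
      have hmid : PySem.Int.floordiv (0 + 0) 2 = 0 := by decide
      have hA : solution 0 counters = 0 := by
        simp only [solution, hmax, Option.getD_some, zero_mul]
        rw [solutionLoop, dif_pos le_rfl]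
        dsimp only
        rw [hmid, gf_zero, if_pos le_rfl]
        rw [solutionLoop, dif_neg (by norm_num)]
      have hB : solution_alt 0 counters = 0 := by
        simp only [solution_alt]
        rw [if_pos le_rfl]
      rw [hA, hB]
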